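-- pv_equiv track=rewrite | github.com/GundalaNikhil/DSA | dsa-problems/Bitwise/testcases/generate_all_testcases.py | bit011_toggle_ranges_min_flips
-- ===== SOURCE A (Python) =====
-- from typing import List, Dict, Any
--
-- def bit011_toggle_ranges_min_flips(A: List[int], B: List[int]) -> int:
--     """BIT-011: Toggle Ranges Minimum Flips"""
--     n = len(A)
--     diff = [A[i] ^ B[i] for i in range(n)]
--     count = 0
--     i = 0
--     while i < n:
--         if diff[i] == 1:
--             count += 1
--             while i < n and diff[i] == 1:
--                 i += 1
--         else:
--             i += 1
--     return count
-- ===== SOURCE B (Python) =====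
-- def bit011_toggle_ranges_min_flips(A, B):
--     # A maximal run of 1s of length L contributes L ones and L-1 adjacent (1,1)
--     # pairs, so #runs = #ones - #adjacent-(1,1)-pairs.
--     diff = [A[i] ^ B[i] for i in range(len(A))]
--     ones = sum(1 for d in diff if d == 1)
--     pairs = sum(1 for x, y in zip(diff, diff[1:]) if x == 1 and y == 1)
--     return ones - pairs
-- ===== Notes on version B (the rewrite author's own statement) =====
-- stated objective: alternative
-- what changed: Replaces run tracking entirely: instead of scanning for runs (A's nested while loops consuming each run), B uses the identity #runs = #ones - #adjacent-(1,1)-pairs, computing two independent stateless counts over diff and zip(diff, diff[1:]) and subtracting.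
import Mathlib
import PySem

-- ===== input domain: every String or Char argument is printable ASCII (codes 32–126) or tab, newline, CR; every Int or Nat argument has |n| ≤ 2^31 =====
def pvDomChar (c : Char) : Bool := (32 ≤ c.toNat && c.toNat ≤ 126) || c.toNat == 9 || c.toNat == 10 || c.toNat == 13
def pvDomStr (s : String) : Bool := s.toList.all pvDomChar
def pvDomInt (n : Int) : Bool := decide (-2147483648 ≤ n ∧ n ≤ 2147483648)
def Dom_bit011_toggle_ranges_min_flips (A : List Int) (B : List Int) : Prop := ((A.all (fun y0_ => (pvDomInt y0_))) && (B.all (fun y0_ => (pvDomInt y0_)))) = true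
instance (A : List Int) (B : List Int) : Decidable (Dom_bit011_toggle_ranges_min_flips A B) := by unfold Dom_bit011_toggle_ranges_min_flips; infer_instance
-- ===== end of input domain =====

-- B avoids run tracking altogether: it counts ones and adjacent (1,1) pairs in diff and
-- returns their difference (#runs = #ones - #adjacent pairs); objective: alternative.

-- ===== PORT A =====
-- inner 'while i < n and diff[i] == 1: i += 1'
def pvSkipA (diff : List Int) (n i : Nat) : Nat :=
  if h : i < n ∧ PySem.List.pyGetD diff (i : Int) 0 = 1 then pvSkipA diff n (i + 1) else i
termination_by n - i
decreasing_by omega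

theorem pvSkipA_ge (diff : List Int) (n i : Nat) : i ≤ pvSkipA diff n i := by
  unfold pvSkipA
  split
  · have := pvSkipA_ge diff n (i + 1); omega
  · exact le_refl i
termination_by n - i
decreasing_by omega

theorem pvSkipA_gt (diff : List Int) (n i : Nat) (hi : i < n)
    (h1 : PySem.List.pyGetD diff (i : Int) 0 = 1) : i < pvSkipA diff n i := by
  conv_rhs => rw [pvSkipA]
  rw [dif_pos ⟨hi, h1⟩]
  have := pvSkipA_ge diff n (i + 1); omega

-- outer 'while i < n: …'
def pvLoopA (diff : List Int) (n i : Nat) (count : Int) : Int :=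
  if h : i < n then
    if h1 : PySem.List.pyGetD diff (i : Int) 0 = 1 then
      pvLoopA diff n (pvSkipA diff n i) (count + 1)
    else
      pvLoopA diff n (i + 1) count
  else count
termination_by n - i
decreasing_by
  · have := pvSkipA_gt diff n i h h1; omega
  · omega

def bit011_toggle_ranges_min_flips (A : List Int) (B : List Int) : Int :=
  let n := A.length
  let diff := (List.range n).map (fun (i : Nat) =>
    Int.xor (PySem.List.pyGetD A (i : Int) 0) (PySem.List.pyGetD B (i : Int) 0))
  pvLoopA diff n 0 0

-- ===== PORT B =====
def bit011_toggle_ranges_min_flips_alt (A : List Int) (B : List Int) : Int :=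
  let diff := (List.range A.length).map (fun (i : Nat) =>
    Int.xor (PySem.List.pyGetD A (i : Int) 0) (PySem.List.pyGetD B (i : Int) 0))
  let ones : Int := ((diff.filter (fun d => decide (d = 1))).length : Int)
  let pairs : Int := (((diff.zip diff.tail).filter
      (fun p => decide (p.1 = 1) && decide (p.2 = 1))).length : Int)
  ones - pairs

-- ===== PRECONDITION & SPEC =====
-- Pre_ excludes exactly the inputs with len(B) < len(A), on which the Python A raises IndexError.
def Pre_bit011_toggle_ranges_min_flips (A : List Int) (B : List Int) : Prop :=
  A.length ≤ B.length
instance (A : List Int) (B : List Int) : Decidable (Pre_bit011_toggle_ranges_min_flips A B) := by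
  unfold Pre_bit011_toggle_ranges_min_flips; infer_instance

def pvWitness_bit011_toggle_ranges_min_flips : List Int × List Int := ([1, 0, 3, 2], [0, 0, 2, 2])

def Spec_bit011_toggle_ranges_min_flips (A : List Int) (B : List Int) (out : Int) : Prop :=
  out = bit011_toggle_ranges_min_flips_alt A B
instance (A : List Int) (B : List Int) (out : Int) :
    Decidable (Spec_bit011_toggle_ranges_min_flips A B out) := by
  unfold Spec_bit011_toggle_ranges_min_flips; infer_instance

-- ===== CLAIM (what is proved, stated in full; the proofs are below) =====
def Claim_equal_bit011_toggle_ranges_min_flips : Prop :=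
  ∀ (A : List Int) (B : List Int), Dom_bit011_toggle_ranges_min_flips A B →
    Pre_bit011_toggle_ranges_min_flips A B →
    Spec_bit011_toggle_ranges_min_flips A B (bit011_toggle_ranges_min_flips A B)

-- ===== LEMMAS AND PROOFS =====

-- reference recursion: count runs of 1s given the previous value
def pvGo (prev : Int) : List Int → Int
  | [] => 0
  | x :: xs => (if x = 1 ∧ prev ≠ 1 then 1 else 0) + pvGo x xs

theorem pvGo_prev_irrel (p q : Int) (hp : p ≠ 1) (hq : q ≠ 1) (xs : List Int) :
    pvGo p xs = pvGo q xs := by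
  cases xs with
  | nil => rfl
  | cons x xs => simp [pvGo, hp, hq]

theorem pvSkipA_stop (L : List Int) (n i : Nat) (h : ¬ (i < n ∧ PySem.List.pyGetD L (i : Int) 0 = 1)) :
    pvSkipA L n i = i := by
  rw [pvSkipA, dif_neg h]

theorem pvGetD_eq (L : List Int) (i : Nat) (hi : i < L.length) :
    PySem.List.pyGetD L (i : Int) 0 = L[i] := by
  rw [PySem.List.pyGetD_natCast, List.getD_eq_getElem?_getD, List.getElem?_eq_getElem hi]
  simp

theorem pvSkipA_go (L : List Int) (k : Nat) :
    ∀ i, L.length - i ≤ k →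
      pvGo 1 (L.drop i) = pvGo 0 (L.drop (pvSkipA L L.length i)) := by
  induction k with
  | zero =>
    intro i h
    have hi : ¬ i < L.length := by omega
    rw [pvSkipA_stop L L.length i (by tauto), List.drop_eq_nil_of_le (by omega)]
    simp [pvGo]
  | succ k ih =>
    intro i h
    by_cases hc : i < L.length ∧ PySem.List.pyGetD L (i : Int) 0 = 1
    · obtain ⟨hi, h1⟩ := hc
      rw [pvSkipA, dif_pos ⟨hi, h1⟩]
      rw [List.drop_eq_getElem_cons hi]
      rw [pvGetD_eq L i hi] at h1
      rw [h1]
      have := ih (i + 1) (by omega)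
      simpa [pvGo] using this
    · rw [pvSkipA_stop L L.length i hc]
      by_cases hi : i < L.length
      · have h1 : L[i] ≠ 1 := by
          intro hh; exact hc ⟨hi, by rw [pvGetD_eq L i hi]; exact hh⟩
        rw [List.drop_eq_getElem_cons hi]
        simp only [pvGo, h1]
        rw [pvGo_prev_irrel L[i] 0 h1 (by decide)]
        simp
      · have hnil : L.drop i = [] := List.drop_eq_nil_of_le (by omega)
        rw [hnil]
        simp [pvGo]

theorem pvLoopA_go (L : List Int) (k : Nat) :
    ∀ i c, L.length - i ≤ k →
      pvLoopA L L.length i c = c + pvGo 0 (L.drop i) := by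
  induction k with
  | zero =>
    intro i c h
    have hi : ¬ i < L.length := by omega
    rw [pvLoopA, dif_neg hi, List.drop_eq_nil_of_le (by omega)]
    simp [pvGo]
  | succ k ih =>
    intro i c h
    rw [pvLoopA]
    by_cases hi : i < L.length
    · rw [dif_pos hi]
      have hdrop := List.drop_eq_getElem_cons hi
      by_cases h1 : PySem.List.pyGetD L (i : Int) 0 = 1
      · rw [dif_pos h1]
        have h1' : L[i] = 1 := by rw [pvGetD_eq L i hi] at h1; exact h1
        have hgt : i < pvSkipA L L.length i := pvSkipA_gt L L.length i hi h1
        rw [ih (pvSkipA L L.length i) (c + 1) (by omega)]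
        have hskip := pvSkipA_go L L.length i (by omega)
        rw [← hskip, hdrop, h1']
        simp [pvGo]
        ring
      · rw [dif_neg h1]
        have h1' : L[i] ≠ 1 := by rw [pvGetD_eq L i hi] at h1; exact h1
        rw [ih (i + 1) c (by omega), hdrop]
        simp only [pvGo, h1']
        rw [pvGo_prev_irrel L[i] 0 h1' (by decide)]
        simp
    · rw [dif_neg hi, List.drop_eq_nil_of_le (by omega)]
      simp [pvGo]

-- B-side characterisation: ones and adjacent pairs
def pvPairsC (prev : Int) : List Int → Int
  | [] => 0
  | x :: xs => (if prev = 1 ∧ x = 1 then 1 else 0) + pvPairsC x xs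

theorem pvPairsZip (xs : List Int) : ∀ x,
    ((((x :: xs).zip xs).filter
      (fun p => decide (p.1 = 1) && decide (p.2 = 1))).length : Int) = pvPairsC x xs := by
  induction xs with
  | nil => intro x; simp [pvPairsC]
  | cons y t ih =>
    intro x
    simp only [List.zip_cons_cons, List.filter_cons, pvPairsC, ← ih y]
    by_cases h : x = 1 ∧ y = 1
    · simp [h.1, h.2]
      omega
    · have : ¬ (decide (x = 1) && decide (y = 1)) = true := by
        simp only [Bool.and_eq_true, decide_eq_true_eq]; exact h
      simp only [this, if_neg h]
      simp

theorem pvOnes_cons (x : Int) (xs : List Int) :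
    (((x :: xs).filter (fun d => decide (d = 1))).length : Int)
      = (if x = 1 then 1 else 0) + ((xs.filter (fun d => decide (d = 1))).length : Int) := by
  simp only [List.filter_cons]
  by_cases h : x = 1
  · simp [h]
    omega
  · simp [h]

theorem pvMain (xs : List Int) : ∀ prev,
    ((xs.filter (fun d => decide (d = 1))).length : Int) - pvPairsC prev xs = pvGo prev xs := by
  induction xs with
  | nil => intro prev; simp [pvPairsC, pvGo]
  | cons x xs ih =>
    intro prev
    rw [pvOnes_cons]
    simp only [pvPairsC, pvGo, ← ih x]
    rcases eq_or_ne x 1 with hx | hx <;> rcases eq_or_ne prev 1 with hp | hp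
    · simp [hx, hp]
    · simp [hx, hp]
      ring
    · simp [hx, hp]
    · simp [hx, hp]

theorem pvAlt_eq_go (A B : List Int) :
    bit011_toggle_ranges_min_flips_alt A B
      = pvGo 0 ((List.range A.length).map (fun (i : Nat) =>
          Int.xor (PySem.List.pyGetD A (i : Int) 0) (PySem.List.pyGetD B (i : Int) 0))) := by
  unfold bit011_toggle_ranges_min_flips_alt
  set L := (List.range A.length).map (fun (i : Nat) =>
    Int.xor (PySem.List.pyGetD A (i : Int) 0) (PySem.List.pyGetD B (i : Int) 0)) with hL
  cases L with
  | nil => simp [pvGo]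
  | cons x xs =>
    simp only [List.tail_cons]
    rw [pvPairsZip xs x]
    have h0 : pvPairsC x xs = pvPairsC 0 (x :: xs) := by
      simp [pvPairsC]
    rw [h0, pvMain (x :: xs) 0]

-- ===== VERDICT (by name: the statement is the Claim_ definition above) =====
theorem pvLoopA_full (L : List Int) (n : Nat) (hn : n = L.length) :
    pvLoopA L n 0 0 = pvGo 0 L := by
  subst hn
  rw [pvLoopA_go L L.length 0 0 (by omega)]
  simp

theorem bit011_toggle_ranges_min_flips_spec : Claim_equal_bit011_toggle_ranges_min_flips := by
  intro A B _ _
  unfold Spec_bit011_toggle_ranges_min_flips bit011_toggle_ranges_min_flips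
  rw [pvAlt_eq_go]
  exact pvLoopA_full _ _ (by simp)
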